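-- pv_equiv track=rewrite | github.com/Unurjargal01/Python_Algorithms_Master | Codechef/March, 2019/CHDIGER.py | solve
-- ===== SOURCE A (Python) =====
-- def solve(seq, digit, counter = 0):
--     if len(seq) == 0: return counter * digit
--     set_ = set(seq)
--     if digit <= min(set_):
--         return (len(seq) + counter) * digit #str??
--     else:
--         for i in range(len(seq)):
--             if seq[i] == min(set_):
--                 return seq[i] + solve(seq[(i + 1):], digit, counter + i)
-- ===== SOURCE B (Python) =====
-- def solve(seq, digit, counter=0):
--     # Single backward pass: a position is "taken" iff it is a suffix-minimum
--     # (<= everything after it) and its value is below digit; everything else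
--     # (plus the initial counter) is paid for at rate `digit`.
--     total = 0
--     taken = 0
--     have_min = False
--     m = 0
--     for x in reversed(seq):
--         if not have_min or x <= m:
--             m = x
--             have_min = True
--             if x < digit:
--                 total += x
--                 taken += 1
--     return total + (len(seq) - taken + counter) * digit
-- ===== Notes on version B (the rewrite author's own statement) =====
-- stated objective: faster
-- what changed: Replaces A's recursive repeated min(set)+slice scan with a single backward pass that sums the suffix-minimum positions whose value is below digit and counts them, combining the remainder in one closed formula.
import Mathlib
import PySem

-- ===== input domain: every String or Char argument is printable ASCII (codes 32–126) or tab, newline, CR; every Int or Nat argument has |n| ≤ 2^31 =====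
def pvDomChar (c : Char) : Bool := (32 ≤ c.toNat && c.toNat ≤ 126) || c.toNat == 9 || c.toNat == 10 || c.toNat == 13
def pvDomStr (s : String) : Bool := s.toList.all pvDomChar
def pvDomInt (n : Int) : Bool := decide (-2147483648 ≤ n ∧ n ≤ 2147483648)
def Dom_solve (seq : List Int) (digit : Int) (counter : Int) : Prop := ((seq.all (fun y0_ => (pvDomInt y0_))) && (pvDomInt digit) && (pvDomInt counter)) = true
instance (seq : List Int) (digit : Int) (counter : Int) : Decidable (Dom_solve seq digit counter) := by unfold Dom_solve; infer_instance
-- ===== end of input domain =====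

-- B replaces A's O(n^2) recursive repeated-min-and-slice scan with one O(n) backward pass
-- (suffix minima summed and counted, remainder paid at rate `digit` by a closed formula).

-- ===== PORT A =====
-- literal port of A; the recursion descends into seq[(i+1):] where i is the first index of min(set_)
def solve (seq : List Int) (digit : Int) (counter : Int) : Int :=
  if seq.length == 0 then counter * digit
  else
    let set_ := PySem.Set.ofList seq
    if digit ≤ (PySem.List.min? set_ (fun x => x)).getD 0 then
      ((seq.length : Int) + counter) * digit
    else
      match h : PySem.List.index? seq ((PySem.List.min? set_ (fun x => x)).getD 0) with
      | some i =>
          -- the loop `for i in range(len(seq)): if seq[i] == min(set_): return …` returns at the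
          -- FIRST index of min(set_); index? is that first index.  seq[i] = pyGetD (i in range).
          PySem.List.pyGetD seq (i : Int) 0
            + solve (PySem.List.slice seq (some ((i : Int) + 1)) none) digit (counter + (i : Int))
      | none => 0  -- unreachable: min(set_) is an element of seq, so index? is always `some`
termination_by seq.length
decreasing_by
  rcases ((PySem.List.index?_eq_some_iff _ _ _).mp h) with ⟨pre, suf, hseq, hlen, -⟩
  rw [PySem.List.slice_from seq (a := (i : Int) + 1) (by positivity)]
  have : ((i : Int) + 1).toNat = i + 1 := by omega
  rw [this]
  simp only [hseq, List.length_drop, List.length_append, List.length_cons]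
  omega

-- ===== PORT B =====
-- literal port of Source B: one fold over reversed(seq) with state (total, taken, have_min, m)
def solve_alt (seq : List Int) (digit : Int) (counter : Int) : Int :=
  let st := seq.reverse.foldl
    (fun (s : Int × Int × Bool × Int) (x : Int) =>
      if !s.2.2.1 || x ≤ s.2.2.2 then
        if x < digit then (s.1 + x, s.2.1 + 1, true, x) else (s.1, s.2.1, true, x)
      else s)
    (0, 0, false, 0)
  st.1 + ((seq.length : Int) - st.2.1 + counter) * digit

-- ===== PRECONDITION & SPEC =====
def Spec_solve (seq : List Int) (digit : Int) (counter : Int) (out : Int) : Prop := out = solve_alt seq digit counter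
instance (seq : List Int) (digit : Int) (counter : Int) (out : Int) : Decidable (Spec_solve seq digit counter out) := by unfold Spec_solve; infer_instance

-- ===== CLAIM (what is proved, stated in full; the proofs are below) =====
def Claim_equal_solve : Prop := ∀ (seq : List Int) (digit : Int) (counter : Int), Dom_solve seq digit counter → Spec_solve seq digit counter (solve seq digit counter)

-- ===== LEMMAS AND PROOFS =====

-- the fold step of B, named for the proofs
def bStep (digit : Int) (s : Int × Int × Bool × Int) (x : Int) : Int × Int × Bool × Int :=
  if !s.2.2.1 || x ≤ s.2.2.2 then
    if x < digit then (s.1 + x, s.2.1 + 1, true, x) else (s.1, s.2.1, true, x)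
  else s

-- B's backward pass as a structural (right-to-left) recursion
def bScan (digit : Int) (l : List Int) : Int × Int × Bool × Int :=
  l.foldr (fun x s => bStep digit s x) (0, 0, false, 0)

theorem bScan_cons (digit x : Int) (l : List Int) :
    bScan digit (x :: l) = bStep digit (bScan digit l) x := rfl

theorem solve_alt_eq (seq : List Int) (digit counter : Int) :
    solve_alt seq digit counter
      = (bScan digit seq).1 + ((seq.length : Int) - (bScan digit seq).2.1 + counter) * digit := by
  simp [solve_alt, bScan, bStep, List.foldl_reverse]

-- after scanning a nonempty list, have_min is set and m is a lower bound belonging to the list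
theorem bScan_min (digit : Int) (l : List Int) (hl : l ≠ []) :
    (bScan digit l).2.2.1 = true ∧ (bScan digit l).2.2.2 ∈ l ∧
      ∀ x ∈ l, (bScan digit l).2.2.2 ≤ x := by
  induction l with
  | nil => exact absurd rfl hl
  | cons a t ih =>
    rw [bScan_cons]
    by_cases ht : t = []
    · subst ht
      unfold bStep bScan
      simp only [List.foldr_nil, Bool.not_false, Bool.true_or, if_pos]
      split_ifs <;> simp
    · obtain ⟨h1, h2, h3⟩ := ih ht
      unfold bStep
      rw [h1]
      by_cases hle : a ≤ (bScan digit t).2.2.2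
      · rw [if_pos (by simp [hle])]
        have hbnd : ∀ x ∈ a :: t, a ≤ x := by
          intro x hx
          rcases List.mem_cons.mp hx with rfl | hx
          · exact le_refl x
          · exact le_trans hle (h3 x hx)
        split_ifs <;> exact ⟨rfl, List.mem_cons_self, hbnd⟩
      · rw [if_neg (by simp [hle])]
        refine ⟨h1, List.mem_cons_of_mem _ h2, ?_⟩
        intro x hx
        rcases List.mem_cons.mp hx with rfl | hx
        · exact le_of_lt (lt_of_not_ge hle)
        · exact h3 x hx

-- if every element is ≥ digit, nothing is taken
theorem bScan_none (digit : Int) (l : List Int) (h : ∀ x ∈ l, digit ≤ x) :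
    (bScan digit l).1 = 0 ∧ (bScan digit l).2.1 = 0 := by
  induction l with
  | nil => exact ⟨rfl, rfl⟩
  | cons a t ih =>
    obtain ⟨h1, h2⟩ := ih (fun x hx => h x (List.mem_cons_of_mem _ hx))
    have ha : ¬ a < digit := not_lt.mpr (h a (List.mem_cons_self))
    rw [bScan_cons]
    unfold bStep
    split_ifs <;> simp_all

-- elements strictly above the scanned minimum of the tail are skipped
theorem bScan_skip (digit : Int) (pre l : List Int) (hl : l ≠ [])
    (h : ∀ x ∈ pre, (bScan digit l).2.2.2 < x) :
    bScan digit (pre ++ l) = bScan digit l := by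
  induction pre with
  | nil => rfl
  | cons a p ih =>
    have hrec := ih (fun x hx => h x (List.mem_cons_of_mem _ hx))
    rw [List.cons_append, bScan_cons, hrec]
    unfold bStep
    obtain ⟨h1, -, -⟩ := bScan_min digit l hl
    have ha : ¬ a ≤ (bScan digit l).2.2.2 := not_le.mpr (h a List.mem_cons_self)
    simp [h1, ha]

-- taking the minimum at the head
theorem bScan_take (digit m : Int) (l : List Int) (hmin : ∀ x ∈ l, m ≤ x) (hlt : m < digit) :
    bScan digit (m :: l) = ((bScan digit l).1 + m, (bScan digit l).2.1 + 1, true, m) := by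
  rw [bScan_cons]
  unfold bStep
  by_cases hl : l = []
  · subst hl
    unfold bScan
    simp [hlt]
  · obtain ⟨h1, h2, -⟩ := bScan_min digit l hl
    simp [h1, hmin _ h2, hlt]

-- the minimum that A computes: min(set(seq)) is the minimum value of seq
theorem minval_spec (seq : List Int) (hne : seq ≠ []) :
    ∃ m, PySem.List.min? (PySem.Set.ofList seq) (fun x => x) = some m ∧
      m ∈ seq ∧ ∀ x ∈ seq, m ≤ x := by
  have hset : PySem.Set.ofList seq ≠ [] := by
    intro h
    rcases List.exists_mem_of_ne_nil seq hne with ⟨x, hx⟩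
    have : x ∈ PySem.Set.ofList seq := (PySem.Set.mem_ofList _ _).mpr hx
    simp [h] at this
  rcases Option.ne_none_iff_exists'.mp
    (fun h => hset ((PySem.List.min?_eq_none_iff (PySem.Set.ofList seq)
      (fun x : Int => x)).mp h)) with ⟨m, hm⟩
  refine ⟨m, hm, ?_, ?_⟩
  · exact (PySem.Set.mem_ofList _ _).mp (PySem.List.min?_mem hm)
  · intro x hx
    exact PySem.List.min?_isMin hm x ((PySem.Set.mem_ofList _ _).mpr hx)

theorem solve_eq_alt (seq : List Int) (digit counter : Int) :
    solve seq digit counter = solve_alt seq digit counter := by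
  generalize hn : seq.length = n
  induction n using Nat.strong_induction_on generalizing seq counter with
  | _ n ih =>
  by_cases hne : seq = []
  · subst hne
    rw [solve.eq_def, solve_alt_eq]
    simp [bScan]
  · rcases minval_spec seq hne with ⟨m, hm, hmem, hmin⟩
    rw [solve.eq_def]
    have hlen0 : ¬ (seq.length == 0) = true := by
      simp [List.length_eq_zero_iff, hne]
    rw [if_neg hlen0]
    simp only [hm, Option.getD_some]
    by_cases hd : digit ≤ m
    · rw [if_pos hd, solve_alt_eq]
      obtain ⟨h1, h2⟩ := bScan_none digit seq (fun x hx => le_trans hd (hmin x hx))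
      rw [h1, h2]
      ring
    · rw [if_neg hd]
      rcases Option.ne_none_iff_exists'.mp
        (fun h => ((PySem.List.index?_eq_none_iff _ _).mp h) hmem) with ⟨i, hi⟩
      rcases (PySem.List.index?_eq_some_iff _ _ _).mp hi with ⟨pre, suf, hseq, hplen, hpre⟩
      rcases PySem.List.getElem_of_index?_eq_some hi with ⟨hk, hval, -⟩
      split
      case _ i' h' =>
        rw [hm, Option.getD_some, hi] at h'
        injection h' with h''
        subst h''
        -- seq[i] = m
        rw [PySem.List.pyGetD_natCast, List.getD_eq_getElem seq 0 hk, hval]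
        -- seq[(i+1):] = suf
        have htn : (((i : Nat) : Int) + 1).toNat = i + 1 := by omega
        rw [PySem.List.slice_from seq (a := (i : Int) + 1) (by positivity), htn]
        have hdrop : seq.drop (i + 1) = suf := by
          rw [hseq, List.append_cons, List.drop_left' (by simp [hplen])]
        rw [hdrop]
        have hlt : suf.length < n := by
          rw [← hn, hseq]
          simp [hplen]
          omega
        rw [ih suf.length hlt suf (counter + (i : Int)) rfl]
        rw [solve_alt_eq, solve_alt_eq]
        have hmins : ∀ x ∈ suf, m ≤ x := fun x hx =>
          hmin x (by rw [hseq]; exact List.mem_append_right _ (List.mem_cons_of_mem _ hx))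
        have ht := bScan_take digit m suf hmins (not_le.mp hd)
        have hpre2 : ∀ x ∈ pre, (bScan digit (m :: suf)).2.2.2 < x := by
          intro x hx
          have h1 : m ≤ x := hmin x (by rw [hseq]; exact List.mem_append_left _ hx)
          have h2 : x ≠ m := fun e => hpre (e ▸ hx)
          rw [ht]
          exact lt_of_le_of_ne h1 (Ne.symm h2)
        have hscan : bScan digit seq
            = ((bScan digit suf).1 + m, (bScan digit suf).2.1 + 1, true, m) := by
          rw [hseq, bScan_skip digit pre (m :: suf) (by simp) hpre2, ht]
        rw [hscan]
        have hL : (seq.length : Int) = (i : Int) + 1 + (suf.length : Int) := by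
          rw [hseq, List.length_append, List.length_cons, hplen]
          push_cast
          ring
        rw [hL]
        ring
      case _ h' =>
        rw [hm, Option.getD_some, hi] at h'
        simp at h'

-- ===== VERDICT (by name: the statement is the Claim_ definition above) =====
theorem solve_spec : Claim_equal_solve := by
  intro seq digit counter _
  unfold Spec_solve
  exact solve_eq_alt seq digit counter
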